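-- pv_equiv track=rewrite | github.com/Morxos/wasmweavercode | drl/rewards.py | calculate_max_dynamic_depth
-- ===== SOURCE A (Python) =====
-- from typing import Type, Dict, List
--
-- def calculate_max_dynamic_depth(trace: List[str]):
--     depth = 0
--     max_depth = 0
--     for inst in trace:
--         if inst in ["START_BlockTile", "START_LoopTile", "START_ConditionTile", "START_CreateFunctionTile","START_FunctionCallTile","START_FunctionIndirectCallTile"]:
--             depth += 1
--         elif inst in ["END_BlockTile", "END_LoopTile", "END_ConditionTile", "END_CreateFunctionTile","END_FunctionCallTile","END_FunctionIndirectCallTile"]: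
--             depth -= 1
--         if depth > max_depth:
--             max_depth = depth
--     return max_depth
-- ===== SOURCE B (Python) =====
-- _STARTS = {"START_BlockTile", "START_LoopTile", "START_ConditionTile",
--            "START_CreateFunctionTile", "START_FunctionCallTile",
--            "START_FunctionIndirectCallTile"}
-- _ENDS = {"END_BlockTile", "END_LoopTile", "END_ConditionTile",
--          "END_CreateFunctionTile", "END_FunctionCallTile",
--          "END_FunctionIndirectCallTile"}
--
-- def _scan(trace, lo, hi):
--     """Return (max depth reached inside trace[lo:hi] starting from depth 0 and
--     floored at 0, net depth change of trace[lo:hi]). Combines halves: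
--     the right half starts at the left half's net depth."""
--     if lo == hi:
--         return (0, 0)
--     if hi - lo == 1:
--         inst = trace[lo]
--         d = 1 if inst in _STARTS else (-1 if inst in _ENDS else 0)
--         return (max(0, d), d)
--     mid = (lo + hi) // 2
--     m_l, n_l = _scan(trace, lo, mid)
--     m_r, n_r = _scan(trace, mid, hi)
--     return (max(m_l, n_l + m_r), n_l + n_r)
--
-- def calculate_max_dynamic_depth(trace):
--     return _scan(trace, 0, len(trace))[0]
-- ===== Notes on version B (the rewrite author's own statement) =====
-- stated objective: alternative
-- what changed: Replaces A's single left-to-right loop carrying (depth, max_depth) by a recursive divide-and-conquer: each half is summarised as a (floored max depth, net depth change) pair and the two summaries are combined associatively (right half's max is offset by the left half's net), the top-level pair's first component being the answer.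
import Mathlib
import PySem

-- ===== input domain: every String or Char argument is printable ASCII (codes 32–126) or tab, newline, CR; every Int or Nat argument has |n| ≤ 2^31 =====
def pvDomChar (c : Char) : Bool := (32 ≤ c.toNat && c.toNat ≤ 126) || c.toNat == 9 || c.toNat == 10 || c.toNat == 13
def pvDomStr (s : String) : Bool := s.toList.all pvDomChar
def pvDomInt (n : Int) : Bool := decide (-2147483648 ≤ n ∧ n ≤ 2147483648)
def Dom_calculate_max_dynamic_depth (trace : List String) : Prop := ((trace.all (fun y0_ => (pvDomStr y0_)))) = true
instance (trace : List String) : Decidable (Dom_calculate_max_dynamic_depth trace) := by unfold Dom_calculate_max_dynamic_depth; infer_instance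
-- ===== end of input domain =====

-- B computes the answer by divide-and-conquer, summarising each half as a
-- (floored max depth, net change) pair and combining the halves, instead of
-- A's single left-to-right loop; objective: alternative (same O(n) cost).


-- ===== PORT A =====
def pvStarts : List String := ["START_BlockTile", "START_LoopTile", "START_ConditionTile", "START_CreateFunctionTile", "START_FunctionCallTile", "START_FunctionIndirectCallTile"]
def pvEnds : List String := ["END_BlockTile", "END_LoopTile", "END_ConditionTile", "END_CreateFunctionTile", "END_FunctionCallTile", "END_FunctionIndirectCallTile"]

-- one iteration of A's loop body over the state (depth, max_depth)
def pvStepA (s : Int × Int) (inst : String) : Int × Int :=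
  let depth := if inst ∈ pvStarts then s.1 + 1 else if inst ∈ pvEnds then s.1 - 1 else s.1
  (depth, if depth > s.2 then depth else s.2)

def calculate_max_dynamic_depth (trace : List String) : Int :=
  (trace.foldl pvStepA (0, 0)).2

-- ===== PORT B =====
-- _scan(trace, lo, hi) ported on the sublist: (floored max depth, net change),
-- halves split at len/2 and combined as in Source B.
def pvScan : List String → Int × Int
  | [] => (0, 0)
  | [x] =>
      let d : Int := if x ∈ pvStarts then 1 else if x ∈ pvEnds then -1 else 0
      (max 0 d, d)
  | x :: y :: rest =>
      let mid := (x :: y :: rest).length / 2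
      let L := pvScan ((x :: y :: rest).take mid)
      let R := pvScan ((x :: y :: rest).drop mid)
      (max L.1 (L.2 + R.1), L.2 + R.2)
termination_by l => l.length
decreasing_by
  · simp only [List.length_take, List.length_cons]; omega
  · simp only [List.length_drop, List.length_cons]; omega

def calculate_max_dynamic_depth_alt (trace : List String) : Int :=
  (pvScan trace).1

-- ===== PRECONDITION & SPEC =====
def Spec_calculate_max_dynamic_depth (trace : List String) (out : Int) : Prop := out = calculate_max_dynamic_depth_alt trace
instance (trace : List String) (out : Int) : Decidable (Spec_calculate_max_dynamic_depth trace out) := by unfold Spec_calculate_max_dynamic_depth; infer_instance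

-- ===== CLAIM (what is proved, stated in full; the proofs are below) =====
def Claim_equal_calculate_max_dynamic_depth : Prop := ∀ (trace : List String), Dom_calculate_max_dynamic_depth trace → Spec_calculate_max_dynamic_depth trace (calculate_max_dynamic_depth trace)

-- ===== LEMMAS AND PROOFS =====

-- the delta of one instruction, for stating the lemmas
def pvDelta (inst : String) : Int :=
  if inst ∈ pvStarts then 1 else if inst ∈ pvEnds then -1 else 0

-- simple left-to-right specification: (max 0 (max prefix sums), net sum)
def pvSpec : List String → Int × Int
  | [] => (0, 0)
  | x :: xs => (max 0 (pvDelta x + (pvSpec xs).1), pvDelta x + (pvSpec xs).2)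

theorem pvSpec_fst_nonneg (l : List String) : 0 ≤ (pvSpec l).1 := by
  cases l with
  | nil => simp [pvSpec]
  | cons x xs => simp [pvSpec]

theorem pvSpec_append (l₁ l₂ : List String) :
    pvSpec (l₁ ++ l₂) =
      (max (pvSpec l₁).1 ((pvSpec l₁).2 + (pvSpec l₂).1), (pvSpec l₁).2 + (pvSpec l₂).2) := by
  induction l₁ with
  | nil =>
      have h := pvSpec_fst_nonneg l₂
      simp only [List.nil_append, pvSpec, zero_add]
      rw [max_eq_right h]
  | cons x xs ih =>
      simp only [List.cons_append, pvSpec, ih, Prod.mk.injEq]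
      refine ⟨?_, by ring⟩
      omega

theorem pvScan_eq_pvSpec (l : List String) : pvScan l = pvSpec l := by
  induction l using pvScan.induct with
  | case1 => simp [pvScan, pvSpec]
  | case2 x => simp [pvScan, pvSpec, pvDelta]
  | case3 x y rest mid ihL ihR =>
      rw [pvScan]
      simp only [mid] at ihL ihR
      rw [ihL, ihR]
      have := pvSpec_append ((x :: y :: rest).take ((x :: y :: rest).length / 2))
        ((x :: y :: rest).drop ((x :: y :: rest).length / 2))
      rw [List.take_append_drop] at this
      rw [this]

theorem pvStepA_eq (s : Int × Int) (inst : String) :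
    pvStepA s inst = (s.1 + pvDelta inst, max s.2 (s.1 + pvDelta inst)) := by
  unfold pvStepA pvDelta
  split_ifs <;> simp <;> omega

-- A's loop from state (d, m) with d ≤ m ends with max_depth = max m (d + (pvSpec l).1)
theorem pvLoopA_eq (l : List String) : ∀ (d m : Int), d ≤ m →
    (l.foldl pvStepA (d, m)).2 = max m (d + (pvSpec l).1) := by
  induction l with
  | nil => intro d m h; simp [pvSpec]; omega
  | cons x xs ih =>
      intro d m h
      have hS := pvSpec_fst_nonneg xs
      simp only [List.foldl_cons, pvStepA_eq]
      rw [ih (d + pvDelta x) (max m (d + pvDelta x)) (le_max_right _ _)]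
      simp only [pvSpec]
      omega

-- ===== VERDICT (by name: the statement is the Claim_ definition above) =====
theorem calculate_max_dynamic_depth_spec : Claim_equal_calculate_max_dynamic_depth := by
  intro trace _
  unfold Spec_calculate_max_dynamic_depth calculate_max_dynamic_depth calculate_max_dynamic_depth_alt
  rw [pvScan_eq_pvSpec, pvLoopA_eq trace 0 0 le_rfl]
  have := pvSpec_fst_nonneg trace
  omega
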